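-- pv_equiv track=rewrite | github.com/Angellsh/COP4533-Group-13 | COP4533-Final-Project/milestone3/algorithm_task1.py | algorithm1
-- ===== SOURCE A (Python) =====
-- def algorithm1(A):
--     # Brute force algorithm O(m*n^2))
--     # Input: matrix A(m x n) representing stock prices
--     # initialize variables
--     # m represents number of stocks
--     # n represents number of days
--     # Output: return tuple (bestStock, bestBuyDay, bestSellDay, maxProfit)
--     m = len(A)
--     n = len(A[0])
--     maxProfit = 0
--     bestStock = 0
--     bestBuyDay = 0
--     bestSellDay = 0
--
--     # iterate through each stock index
--     for i in range(m):
--         # iterate through each day to get the best buy and sell days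
--         for j in range(n-1):
--             # sell day must be after buy day
--             for j2 in range(j + 1, n):
--                 # calculate profit sell day - buy day
--                 profit = A[i][j2] - A[i][j]
--                 if profit > maxProfit:
--                     # update max profit, best stock, buy day, sell day | 1-based index
--                     maxProfit = profit
--                     bestStock = i + 1
--                     bestBuyDay = j + 1
--                     bestSellDay = j2 + 1
--
--     # if profit is 0 return 0
--     if maxProfit == 0:
--         return (0, 0, 0, 0)
--     else:
--         # return the best transaction found
--         return (bestStock, bestBuyDay, bestSellDay, maxProfit)
-- ===== SOURCE B (Python) =====
-- def algorithm1(A):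
--     # One pass per stock with a running prefix-minimum (O(m*n) instead of O(m*n^2));
--     # keeps the lexicographically first (stock, buy, sell) at the maximal profit,
--     # exactly as the brute force does.
--     n = len(A[0])
--     if n < 2:
--         return (0, 0, 0, 0)
--     best = (0, 0, 0, 0)  # (profit, stock, buyDay, sellDay), all 1-based
--     for i, row in enumerate(A):
--         minVal = row[0]
--         minDay = 1
--         for j2 in range(1, n):
--             v = row[j2]
--             if v - minVal > best[0]:
--                 best = (v - minVal, i + 1, minDay, j2 + 1)
--             if v < minVal:
--                 minVal = v
--                 minDay = j2 + 1
--     profit, stock, buy, sell = best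
--     if profit == 0:
--         return (0, 0, 0, 0)
--     return (stock, buy, sell, profit)
-- ===== Notes on version B (the rewrite author's own statement) =====
-- stated objective: faster
-- what changed: Replaces the brute-force scan over all (buy,sell) day pairs per stock by a single forward pass keeping a running prefix minimum (value and earliest day), preserving the lexicographically first (stock,buy,sell) at the maximal profit.
import Mathlib
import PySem

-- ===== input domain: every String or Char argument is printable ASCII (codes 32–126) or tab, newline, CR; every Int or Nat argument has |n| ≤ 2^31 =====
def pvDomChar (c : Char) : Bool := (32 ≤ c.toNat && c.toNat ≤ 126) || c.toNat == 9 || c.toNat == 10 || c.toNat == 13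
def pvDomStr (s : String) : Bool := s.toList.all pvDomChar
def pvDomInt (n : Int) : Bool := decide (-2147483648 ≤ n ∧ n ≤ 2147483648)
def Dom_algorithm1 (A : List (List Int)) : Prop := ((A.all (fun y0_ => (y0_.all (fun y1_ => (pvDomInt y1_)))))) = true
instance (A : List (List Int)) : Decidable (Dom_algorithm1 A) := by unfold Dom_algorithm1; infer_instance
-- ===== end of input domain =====

-- B replaces A's brute-force O(m*n^2) pair enumeration by one O(m*n) forward pass per stock
-- with a running prefix minimum, returning the identical (stock, buy, sell, profit) answer.

-- ===== PORT A =====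
-- literal port of the triple loop; A[i][j] becomes getD (in range on every input Pre_ admits)
def algorithm1 (A : List (List Int)) : List Int :=
  let m := A.length
  let n := (A.headI).length
  let st : Int × Int × Int × Int :=
    (List.range m).foldl (fun st i =>
      (List.range (n-1)).foldl (fun st j =>
        (List.range' (j+1) (n-(j+1))).foldl (fun st j2 =>
          let profit := (A.getD i []).getD j2 0 - (A.getD i []).getD j 0
          if st.1 < profit then (profit, (i:Int)+1, (j:Int)+1, (j2:Int)+1) else st) st) st)
      (0, 0, 0, 0)
  if st.1 = 0 then [0, 0, 0, 0] else [st.2.1, st.2.2.1, st.2.2.2, st.1]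

-- ===== PORT B =====
-- port of Source B: inner `for j2 in range(1, n)` carrying (minVal, minDay) plus the best tuple
def altRow (row : List Int) (n : Nat) (s : Int) (st : Int × Int × Int × Int) :
    Int × Int × Int × Int :=
  ((List.range' 1 (n-1)).foldl
    (fun (p : (Int × Int) × (Int × Int × Int × Int)) j2 =>
      let v := row.getD j2 0
      let st := if p.2.1 < v - p.1.1 then (v - p.1.1, s, p.1.2, (j2:Int)+1) else p.2
      if v < p.1.1 then ((v, (j2:Int)+1), st) else (p.1, st))
    ((row.getD 0 0, 1), st)).2

-- `for i, row in enumerate(A)` as structural recursion over the rows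
def altRows (rows : List (List Int)) (n : Nat) (i : Int) (st : Int × Int × Int × Int) :
    Int × Int × Int × Int :=
  match rows with
  | [] => st
  | row :: rest => altRows rest n (i+1) (altRow row n (i+1) st)

def algorithm1_alt (A : List (List Int)) : List Int :=
  let n := (A.headI).length
  if n < 2 then [0, 0, 0, 0]
  else
    let best := altRows A n 0 (0, 0, 0, 0)
    if best.1 = 0 then [0, 0, 0, 0] else [best.2.1, best.2.2.1, best.2.2.2, best.1]

-- ===== PRECONDITION & SPEC =====
-- exactly where Python A returns: A[0] must exist, and when there are at least 2 days
-- every row must have at least n entries (else A's A[i][j2] raises IndexError)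
def Pre_algorithm1 (A : List (List Int)) : Prop :=
  A ≠ [] ∧ ((A.headI).length ≤ 1 ∨ ∀ row ∈ A, (A.headI).length ≤ row.length)

instance (A : List (List Int)) : Decidable (Pre_algorithm1 A) := by
  unfold Pre_algorithm1; infer_instance

def pvWitness_algorithm1 : List (List Int) := [[7, 1, 5, 3], [2, 9, 1, 4]]

def Spec_algorithm1 (A : List (List Int)) (out : List Int) : Prop := out = algorithm1_alt A
instance (A : List (List Int)) (out : List Int) : Decidable (Spec_algorithm1 A out) := by
  unfold Spec_algorithm1; infer_instance

-- ===== CLAIM (what is proved, stated in full; the proofs are below) =====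
def Claim_equal_algorithm1 : Prop :=
  ∀ (A : List (List Int)), Dom_algorithm1 A → Pre_algorithm1 A → Spec_algorithm1 A (algorithm1 A)

-- ===== LEMMAS AND PROOFS =====

def pvPlLt (a b : Int × Int × Int) : Bool :=
  a.1 < b.1 || (a.1 == b.1 && (a.2.1 < b.2.1 || (a.2.1 == b.2.1 && a.2.2 < b.2.2)))
def pvLe (a b : Int × Int × Int × Int) : Bool :=
  a.1 < b.1 || (a.1 == b.1 && (b.2 == a.2 || pvPlLt b.2 a.2))
theorem pvLe_refl (a : Int × Int × Int × Int) : pvLe a a = true := by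
  obtain ⟨a1,a2,a3,a4⟩ := a; simp [pvLe, pvPlLt]
theorem pvLe_trans {a b c : Int × Int × Int × Int} (h1 : pvLe a b = true)
    (h2 : pvLe b c = true) : pvLe a c = true := by
  obtain ⟨a1,a2,a3,a4⟩ := a; obtain ⟨b1,b2,b3,b4⟩ := b; obtain ⟨c1,c2,c3,c4⟩ := c
  simp [pvLe, pvPlLt, Prod.mk.injEq] at *; omega
theorem pvLe_total (a b : Int × Int × Int × Int) : pvLe a b = true ∨ pvLe b a = true := by
  obtain ⟨a1,a2,a3,a4⟩ := a; obtain ⟨b1,b2,b3,b4⟩ := b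
  simp [pvLe, pvPlLt, Prod.mk.injEq]; omega
theorem pvLe_antisymm {a b : Int × Int × Int × Int} (h1 : pvLe a b = true)
    (h2 : pvLe b a = true) : a = b := by
  obtain ⟨a1,a2,a3,a4⟩ := a; obtain ⟨b1,b2,b3,b4⟩ := b
  simp [pvLe, pvPlLt, Prod.mk.injEq] at *; omega
def pvOp (a b : Int × Int × Int × Int) : Int × Int × Int × Int :=
  if pvLe a b then b else a
theorem pvLe_pvOp_left (a b : Int × Int × Int × Int) : pvLe a (pvOp a b) = true := by
  unfold pvOp; split
  · assumption
  · exact pvLe_refl a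
theorem pvLe_pvOp_right (a b : Int × Int × Int × Int) : pvLe b (pvOp a b) = true := by
  unfold pvOp; split
  · exact pvLe_refl b
  · rcases pvLe_total a b with h | h
    · simp_all
    · exact h
theorem pvOp_le {a b c : Int × Int × Int × Int} (h1 : pvLe a c = true)
    (h2 : pvLe b c = true) : pvLe (pvOp a b) c = true := by
  unfold pvOp; split <;> assumption
theorem pvOp_cases (a b : Int × Int × Int × Int) : pvOp a b = a ∨ pvOp a b = b := by
  unfold pvOp; split
  · exact Or.inr rfl
  · exact Or.inl rfl
theorem foldl_op_grow (L : List (Int × Int × Int × Int)) (st : Int × Int × Int × Int) :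
    pvLe st (L.foldl pvOp st) = true := by
  induction L generalizing st with
  | nil => exact pvLe_refl st
  | cons c L ih =>
    exact pvLe_trans (pvLe_pvOp_left st c) (ih (pvOp st c))
theorem foldl_op_mem {c : Int × Int × Int × Int} {L : List (Int × Int × Int × Int)}
    (hc : c ∈ L) (st : Int × Int × Int × Int) : pvLe c (L.foldl pvOp st) = true := by
  induction L generalizing st with
  | nil => cases hc
  | cons d L ih =>
    rcases List.mem_cons.mp hc with h | h
    · subst h
      exact pvLe_trans (pvLe_pvOp_right st c) (foldl_op_grow L (pvOp st c))
    · exact ih h (pvOp st d)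
theorem foldl_op_lub {L : List (Int × Int × Int × Int)} {st x : Int × Int × Int × Int}
    (hst : pvLe st x = true) (h : ∀ c ∈ L, pvLe c x = true) :
    pvLe (L.foldl pvOp st) x = true := by
  induction L generalizing st with
  | nil => exact hst
  | cons c L ih =>
    exact ih (pvOp_le hst (h c (by simp))) (fun d hd => h d (by simp [hd]))
theorem foldl_op_eq {L₁ L₂ : List (Int × Int × Int × Int)} (st : Int × Int × Int × Int)
    (h12 : ∀ c ∈ L₁, ∃ d ∈ L₂, pvLe c d = true)
    (h21 : ∀ c ∈ L₂, ∃ d ∈ L₁, pvLe c d = true) :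
    L₁.foldl pvOp st = L₂.foldl pvOp st := by
  apply pvLe_antisymm
  · apply foldl_op_lub (foldl_op_grow L₂ st)
    intro c hc
    obtain ⟨d, hd, hle⟩ := h12 c hc
    exact pvLe_trans hle (foldl_op_mem hd st)
  · apply foldl_op_lub (foldl_op_grow L₁ st)
    intro c hc
    obtain ⟨d, hd, hle⟩ := h21 c hc
    exact pvLe_trans hle (foldl_op_mem hd st)
def pvStep (st c : Int × Int × Int × Int) : Int × Int × Int × Int :=
  if st.1 < c.1 then c else st
theorem pvStep_eq_pvOp {st c : Int × Int × Int × Int} (h : pvPlLt st.2 c.2 = true) :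
    pvStep st c = pvOp st c := by
  obtain ⟨a1,a2,a3,a4⟩ := st; obtain ⟨b1,b2,b3,b4⟩ := c
  simp only [pvStep, pvOp, pvLe, pvPlLt] at *
  simp only [Bool.or_eq_true, Bool.and_eq_true, decide_eq_true_eq, beq_iff_eq,
    Prod.mk.injEq] at *
  split <;> split <;> first | rfl | (exfalso; omega)
theorem foldl_step_eq_op {L : List (Int × Int × Int × Int)} :
    ∀ {st : Int × Int × Int × Int}, (∀ c ∈ L, pvPlLt st.2 c.2 = true) →
    L.Pairwise (fun a b => pvPlLt a.2 b.2 = true) →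
    L.foldl pvStep st = L.foldl pvOp st := by
  induction L with
  | nil => intro st _ _; rfl
  | cons c L ih =>
    intro st h hp
    rw [List.foldl_cons, List.foldl_cons, pvStep_eq_pvOp (h c (by simp))]
    apply ih _ (List.Pairwise.of_cons hp)
    intro d hd
    rcases pvOp_cases st c with h' | h' <;> rw [h']
    · exact h d (by simp [hd])
    · exact (List.pairwise_cons.mp hp).1 d hd
theorem foldl_step_mem (L : List (Int × Int × Int × Int)) (st : Int × Int × Int × Int) :
    L.foldl pvStep st = st ∨ L.foldl pvStep st ∈ L := by
  induction L generalizing st with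
  | nil => exact Or.inl rfl
  | cons c L ih =>
    rw [List.foldl_cons]
    rcases ih (pvStep st c) with h | h
    · rw [h]; unfold pvStep; split
      · exact Or.inr (by simp)
      · exact Or.inl rfl
    · exact Or.inr (by simp [h])
def pvMk (row : List Int) (s : Int) (j j2 : Nat) : Int × Int × Int × Int :=
  (row.getD j2 0 - row.getD j 0, s, (j:Int)+1, (j2:Int)+1)
def pvPairs (row : List Int) (n : Nat) (s : Int) : List (Int × Int × Int × Int) :=
  (List.range (n-1)).flatMap (fun j =>
    (List.range' (j+1) (n-(j+1))).map (fun j2 => pvMk row s j j2))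
def pvScan (row : List Int) (js : List Nat) (mv : Int) (mi : Nat) (s : Int) :
    List (Int × Int × Int × Int) :=
  match js with
  | [] => []
  | j :: rest =>
    (row.getD j 0 - mv, s, (mi:Int)+1, (j:Int)+1) ::
      pvScan row rest (if row.getD j 0 < mv then row.getD j 0 else mv)
        (if row.getD j 0 < mv then j else mi) s

theorem pvPairs_mem {row : List Int} {n : Nat} {s : Int} {c : Int × Int × Int × Int}
    (hc : c ∈ pvPairs row n s) : ∃ j j2, j < j2 ∧ 1 ≤ j2 ∧ j2 < n ∧ c = pvMk row s j j2 := by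
  simp only [pvPairs, List.mem_flatMap, List.mem_map, List.mem_range, List.mem_range'] at hc
  obtain ⟨j, hj, j2, ⟨i, hi, rfl⟩, rfl⟩ := hc
  refine ⟨j, j + 1 + 1 * i, ?_, ?_, ?_, rfl⟩ <;> omega

theorem pvPairs_mem_of {row : List Int} {n : Nat} {s : Int} {j j2 : Nat}
    (h1 : j < j2) (h2 : j2 < n) : pvMk row s j j2 ∈ pvPairs row n s := by
  simp only [pvPairs, List.mem_flatMap, List.mem_map, List.mem_range, List.mem_range']
  exact ⟨j, by omega, j2, ⟨j2 - (j+1), by omega, by omega⟩, rfl⟩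

theorem pvPairs_pairwise (row : List Int) (n : Nat) (s : Int) :
    (pvPairs row n s).Pairwise (fun a b => pvPlLt a.2 b.2 = true) := by
  unfold pvPairs
  rw [List.flatMap_def, List.pairwise_flatten]
  refine ⟨?_, ?_⟩
  · intro l hl
    simp only [List.mem_map, List.mem_range] at hl
    obtain ⟨j, hj, rfl⟩ := hl
    refine List.Pairwise.map _ ?_ (List.pairwise_lt_range' ..)
    intro a b hab
    simp [pvMk, pvPlLt]; omega
  · refine List.Pairwise.map _ ?_ List.pairwise_lt_range
    intro j j' h a ha b hb
    simp only [List.mem_map, List.mem_range'] at ha hb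
    obtain ⟨j2, ⟨i, hi, rfl⟩, rfl⟩ := ha
    obtain ⟨j2', ⟨i', hi', rfl⟩, rfl⟩ := hb
    simp [pvMk, pvPlLt]; omega
theorem pvScan_bounds {row : List Int} {s : Int} :
    ∀ {k d : Nat} {mv : Int} {mi : Nat} {c : Int × Int × Int × Int}, mi ≤ d →
    c ∈ pvScan row (List.range' d k) mv mi s →
    c.2.1 = s ∧ (mi:Int)+1 ≤ c.2.2.1 ∧ (d:Int)+1 ≤ c.2.2.2 := by
  intro k
  induction k with
  | zero => intro d mv mi c _ hc; simp [pvScan] at hc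
  | succ k ih =>
    intro d mv mi c hmid hc
    rw [List.range'_succ] at hc
    rcases List.mem_cons.mp hc with h | h
    · subst h; refine ⟨rfl, by simp, by simp⟩
    · have := ih (d := d+1) (mi := if row.getD d 0 < mv then d else mi) (by split <;> omega) h
      refine ⟨this.1, ?_, by omega⟩
      have h2 := this.2.1
      split at h2 <;> omega

theorem pvScan_pairwise (row : List Int) (s : Int) :
    ∀ (k d : Nat) (mv : Int) (mi : Nat), mi ≤ d →
    (pvScan row (List.range' d k) mv mi s).Pairwise (fun a b => pvPlLt a.2 b.2 = true) := by
  intro k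
  induction k with
  | zero => intro d mv mi _; simp [pvScan]
  | succ k ih =>
    intro d mv mi hmid
    rw [List.range'_succ]
    unfold pvScan
    refine List.pairwise_cons.mpr ⟨?_, ih (d+1) _ _ (by split <;> omega)⟩
    intro c hc
    have hb := pvScan_bounds (s := s) (by split <;> omega : (if row.getD d 0 < mv then d else mi) ≤ d + 1) hc
    obtain ⟨h1, h2, h3⟩ := hb
    have h2' : (mi:Int) + 1 ≤ c.2.2.1 := by split at h2 <;> omega
    simp [pvPlLt, h1]
    omega

theorem pvScan_mem {row : List Int} {s : Int} :
    ∀ {k d : Nat} {mv : Int} {mi : Nat}, mi < d → row.getD mi 0 = mv →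
    ∀ {c : Int × Int × Int × Int}, c ∈ pvScan row (List.range' d k) mv mi s →
    ∃ j j2, j < j2 ∧ j2 < d + k ∧ c = pvMk row s j j2 := by
  intro k
  induction k with
  | zero => intro d mv mi _ _ c hc; simp [pvScan] at hc
  | succ k ih =>
    intro d mv mi hmid hmv c hc
    rw [List.range'_succ] at hc
    rcases List.mem_cons.mp hc with h | h
    · exact ⟨mi, d, hmid, by omega, by subst h; simp only [pvMk, hmv]⟩
    · have hmv' : row.getD (if row.getD d 0 < mv then d else mi) 0
          = (if row.getD d 0 < mv then row.getD d 0 else mv) := by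
        split
        · rfl
        · exact hmv
      obtain ⟨j, j2, hjj, hj2, hc⟩ := ih (d := d+1) (by split <;> omega) hmv' h
      exact ⟨j, j2, hjj, by omega, hc⟩

theorem pvScan_dom {row : List Int} {s : Int} :
    ∀ {k d : Nat} {mv : Int} {mi : Nat}, mi < d → row.getD mi 0 = mv →
    (∀ t, t < d → mv ≤ row.getD t 0) → (∀ t, t < mi → mv < row.getD t 0) →
    ∀ {j j2 : Nat}, j < j2 → d ≤ j2 → j2 < d + k →
    ∃ c ∈ pvScan row (List.range' d k) mv mi s, pvLe (pvMk row s j j2) c = true := by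
  intro k
  induction k with
  | zero => intro d mv mi _ _ _ _ j j2 _ _ _; omega
  | succ k ih =>
    intro d mv mi h1 h2 h3 h4 j j2 hjj hdj2 hj2
    rw [List.range'_succ]
    unfold pvScan
    by_cases hcase : j2 = d
    · subst hcase
      refine ⟨_, List.mem_cons_self .., ?_⟩
      have hle : mv ≤ row.getD j 0 := h3 j (by omega)
      rcases eq_or_lt_of_le hle with he | hlt
      · have hmij : mi ≤ j := by
          by_contra hlt'
          have := h4 j (by omega)
          omega
        simp only [pvLe, pvPlLt, pvMk, Bool.or_eq_true, Bool.and_eq_true,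
          decide_eq_true_eq, beq_iff_eq, Prod.mk.injEq, true_and, and_true]
        omega
      · simp only [pvLe, pvPlLt, pvMk, Bool.or_eq_true, Bool.and_eq_true,
          decide_eq_true_eq, beq_iff_eq, Prod.mk.injEq, true_and, and_true]
        omega
    · have h1' : (if row.getD d 0 < mv then d else mi) < d + 1 := by split <;> omega
      have h2' : row.getD (if row.getD d 0 < mv then d else mi) 0
          = (if row.getD d 0 < mv then row.getD d 0 else mv) := by
        split
        · rfl
        · exact h2
      have h3' : ∀ t, t < d + 1 →
          (if row.getD d 0 < mv then row.getD d 0 else mv) ≤ row.getD t 0 := by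
        intro t ht
        by_cases htd : t = d
        · subst htd; split <;> omega
        · have := h3 t (by omega); split <;> omega
      have h4' : ∀ t, t < (if row.getD d 0 < mv then d else mi) →
          (if row.getD d 0 < mv then row.getD d 0 else mv) < row.getD t 0 := by
        intro t ht
        split at ht
        · have := h3 t (by omega); split <;> omega
        · have := h4 t ht; split <;> omega
      obtain ⟨c, hc, hle⟩ := ih h1' h2' h3' h4' hjj (by omega) (by omega)
      exact ⟨c, List.mem_cons_of_mem _ hc, hle⟩
theorem bridgeA (row : List Int) (n : Nat) (s : Int) (st : Int × Int × Int × Int) :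
    (List.range (n-1)).foldl (fun st j =>
      (List.range' (j+1) (n-(j+1))).foldl (fun st j2 =>
        let profit := row.getD j2 0 - row.getD j 0
        if st.1 < profit then (profit, s, (j:Int)+1, (j2:Int)+1) else st) st) st
    = (pvPairs row n s).foldl pvStep st := by
  rw [pvPairs, List.foldl_flatMap]
  refine List.foldl_ext _ _ st ?_
  intro st j _
  rw [List.foldl_map]
  rfl

theorem bridgeB_aux (row : List Int) (s : Int) :
    ∀ (js : List Nat) (mv : Int) (mi : Nat) (st : Int × Int × Int × Int),
    (js.foldl
      (fun (p : (Int × Int) × (Int × Int × Int × Int)) j2 =>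
        let v := row.getD j2 0
        let st := if p.2.1 < v - p.1.1 then (v - p.1.1, s, p.1.2, (j2:Int)+1) else p.2
        if v < p.1.1 then ((v, (j2:Int)+1), st) else (p.1, st))
      ((mv, (mi:Int)+1), st)).2
    = (pvScan row js mv mi s).foldl pvStep st := by
  intro js
  induction js with
  | nil => intro mv mi st; rfl
  | cons j js ih =>
    intro mv mi st
    rw [List.foldl_cons]
    show ((js.foldl _ (if row.getD j 0 < mv
        then ((row.getD j 0, (j:Int)+1), if st.1 < row.getD j 0 - mv then (row.getD j 0 - mv, s, (mi:Int)+1, (j:Int)+1) else st)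
        else ((mv, (mi:Int)+1), if st.1 < row.getD j 0 - mv then (row.getD j 0 - mv, s, (mi:Int)+1, (j:Int)+1) else st))).2 = _)
    unfold pvScan
    rw [List.foldl_cons]
    by_cases h : row.getD j 0 < mv
    · simp only [if_pos h]
      exact ih (row.getD j 0) j (pvStep st (row.getD j 0 - mv, s, (mi:Int)+1, (j:Int)+1))
    · simp only [if_neg h]
      exact ih mv mi (pvStep st (row.getD j 0 - mv, s, (mi:Int)+1, (j:Int)+1))

theorem bridgeB (row : List Int) (n : Nat) (s : Int) (st : Int × Int × Int × Int) :
    altRow row n s st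
    = (pvScan row (List.range' 1 (n-1)) (row.getD 0 0) 0 s).foldl pvStep st := by
  have := bridgeB_aux row s (List.range' 1 (n-1)) (row.getD 0 0) 0 st
  simpa [altRow] using this

theorem pvPlLt_of_stock {s : Int} {st c : Int × Int × Int × Int} (h1 : st.2.1 < s)
    (h2 : c.2.1 = s) : pvPlLt st.2 c.2 = true := by
  simp only [pvPlLt, Bool.or_eq_true, decide_eq_true_eq]
  omega

theorem rowEq (row : List Int) (n : Nat) (s : Int) (st : Int × Int × Int × Int)
    (hst : st.2.1 < s) :
    (pvPairs row n s).foldl pvStep st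
    = (pvScan row (List.range' 1 (n-1)) (row.getD 0 0) 0 s).foldl pvStep st := by
  have hA1 : ∀ c ∈ pvPairs row n s, pvPlLt st.2 c.2 = true := by
    intro c hc
    obtain ⟨j, j2, _, _, _, rfl⟩ := pvPairs_mem hc
    exact pvPlLt_of_stock hst rfl
  have hB1 : ∀ c ∈ pvScan row (List.range' 1 (n-1)) (row.getD 0 0) 0 s,
      pvPlLt st.2 c.2 = true := by
    intro c hc
    exact pvPlLt_of_stock hst (pvScan_bounds (by omega) hc).1
  rw [foldl_step_eq_op hA1 (pvPairs_pairwise row n s),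
      foldl_step_eq_op hB1 (pvScan_pairwise row s (n-1) 1 _ _ (by omega))]
  apply foldl_op_eq
  · intro c hc
    obtain ⟨j, j2, hjj, h1j2, hj2n, rfl⟩ := pvPairs_mem hc
    refine pvScan_dom (by omega) rfl ?_ ?_ hjj (by omega) (by omega)
    · intro t ht
      have : t = 0 := by omega
      subst this
      exact le_refl _
    · intro t ht
      omega
  · intro c hc
    obtain ⟨j, j2, hjj, hj2, rfl⟩ := pvScan_mem (by omega) rfl hc
    exact ⟨_, pvPairs_mem_of hjj (by omega), pvLe_refl _⟩
theorem rowsEq (A : List (List Int)) (n : Nat) :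
    ∀ (k i : Nat) (st : Int × Int × Int × Int), i + k = A.length → st.2.1 ≤ (i:Int) →
    (List.range' i k).foldl (fun st i =>
      (pvPairs (A.getD i []) n ((i:Int)+1)).foldl pvStep st) st
    = altRows (A.drop i) n (i:Int) st := by
  intro k
  induction k with
  | zero =>
    intro i st hlen hst
    rw [List.drop_eq_nil_of_le (by omega)]
    rfl
  | succ k ih =>
    intro i st hlen hst
    have hi : i < A.length := by omega
    rw [List.range'_succ, List.foldl_cons, List.drop_eq_getElem_cons hi]
    show _ = altRows (A.drop (i+1)) n ((i:Int)+1) (altRow A[i] n ((i:Int)+1) st)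
    have hrow : A.getD i [] = A[i] := List.getD_eq_getElem A [] hi
    rw [bridgeB, ← rowEq _ n _ st (by omega), hrow]
    have hst' : ((pvPairs A[i] n ((i:Int)+1)).foldl pvStep st).2.1 ≤ ((i:Int)+1) := by
      rcases foldl_step_mem (pvPairs A[i] n ((i:Int)+1)) st with h | h
      · rw [h]; omega
      · obtain ⟨j, j2, _, _, _, hc⟩ := pvPairs_mem h
        rw [hc]
        exact le_refl _
    have := ih (i+1) ((pvPairs A[i] n ((i:Int)+1)).foldl pvStep st) (by omega) (by push_cast; exact hst')
    push_cast at this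
    exact this

-- ===== VERDICT (by name: the statement is the Claim_ definition above) =====
theorem algorithm1_spec : Claim_equal_algorithm1 := by
  unfold Claim_equal_algorithm1 Spec_algorithm1
  intro A _ _
  by_cases hn : (A.headI).length < 2
  · have h0 : (A.headI).length - 1 = 0 := by omega
    simp only [algorithm1, algorithm1_alt, h0, List.range_zero, List.foldl_nil, if_pos hn,
      List.foldl_fixed]
    norm_num
  · simp only [algorithm1, algorithm1_alt, if_neg hn]
    have hA : (List.range A.length).foldl (fun st i =>
        (List.range ((A.headI).length - 1)).foldl (fun st j =>
          (List.range' (j+1) ((A.headI).length-(j+1))).foldl (fun st j2 =>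
            let profit := (A.getD i []).getD j2 0 - (A.getD i []).getD j 0
            if st.1 < profit then (profit, (i:Int)+1, (j:Int)+1, (j2:Int)+1) else st) st) st)
        (((0:Int), (0:Int), (0:Int), (0:Int)) : Int × Int × Int × Int)
        = altRows A (A.headI).length 0 ((0:Int),(0:Int),(0:Int),(0:Int)) := by
      calc (List.range A.length).foldl (fun st i =>
            (List.range ((A.headI).length - 1)).foldl (fun st j =>
              (List.range' (j+1) ((A.headI).length-(j+1))).foldl (fun st j2 =>
                let profit := (A.getD i []).getD j2 0 - (A.getD i []).getD j 0
                if st.1 < profit then (profit, (i:Int)+1, (j:Int)+1, (j2:Int)+1) else st) st) st)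
            (((0:Int), (0:Int), (0:Int), (0:Int)) : Int × Int × Int × Int)
          = (List.range A.length).foldl (fun st i =>
            (pvPairs (A.getD i []) (A.headI).length ((i:Int)+1)).foldl pvStep st)
            ((0:Int),(0:Int),(0:Int),(0:Int)) := by
            refine List.foldl_ext _ _ _ ?_
            intro st i _
            exact bridgeA (A.getD i []) (A.headI).length ((i:Int)+1) st
        _ = (List.range' 0 A.length).foldl (fun st i =>
            (pvPairs (A.getD i []) (A.headI).length ((i:Int)+1)).foldl pvStep st)
            ((0:Int),(0:Int),(0:Int),(0:Int)) := by rw [List.range_eq_range']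
        _ = altRows A (A.headI).length 0 ((0:Int),(0:Int),(0:Int),(0:Int)) := by
            simpa using rowsEq A (A.headI).length A.length 0 _ (by omega) (by norm_num)
    rw [hA]
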